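-- pv_equiv track=rewrite | github.com/ASChampOmega/ResumeReader | All_Functions.py | move_back
-- ===== SOURCE A (Python) =====
-- def move_back(s, i, last_char, last_idx):
--   s1 = ""
--   i -= 1
--   while(i >= last_idx):
--     if(s[i] in last_char):
--       break;
--     s1 += s[i]
--     i -= 1
--   return s1[::-1]
-- ===== SOURCE B (Python) =====
-- def move_back(s, i, last_char, last_idx):
--     seg = s[last_idx:i]
--     pos = -1
--     for c in last_char:
--         pos = max(pos, seg.rfind(c))
--     return seg[pos + 1:]
-- ===== Notes on version B (the rewrite author's own statement) =====
-- stated objective: idiomatic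
-- what changed: A's backward character-by-character while-loop that accumulates and reverses is replaced by slicing the window s[last_idx:i] once, locating the rightmost delimiter with per-character rfind, and returning the tail of the slice.
-- outside the precondition, e.g. on move_back('abc', -1, 'x', 1): A returns '', B returns 'b'; on move_back('abc', 3, 'x', -2): A returns 'bcabc', B returns 'bc'; on move_back('abc', 9, 'x', 0): A raises IndexError, B returns 'abc'
import Mathlib
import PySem

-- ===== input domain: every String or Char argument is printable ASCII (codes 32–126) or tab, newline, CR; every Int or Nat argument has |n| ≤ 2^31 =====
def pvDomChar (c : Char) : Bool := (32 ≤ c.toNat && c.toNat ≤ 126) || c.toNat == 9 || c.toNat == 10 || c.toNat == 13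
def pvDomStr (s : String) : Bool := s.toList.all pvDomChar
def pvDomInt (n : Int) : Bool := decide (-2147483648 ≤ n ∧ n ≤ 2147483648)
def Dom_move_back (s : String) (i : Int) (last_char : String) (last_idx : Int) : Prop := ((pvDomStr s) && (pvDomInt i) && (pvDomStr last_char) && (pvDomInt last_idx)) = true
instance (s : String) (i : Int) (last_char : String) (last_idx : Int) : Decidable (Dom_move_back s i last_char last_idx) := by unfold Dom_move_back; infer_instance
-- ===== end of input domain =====

-- B replaces A's backward character-by-character scan by "slice the window, take the
-- rightmost delimiter position via per-character rfind, return the tail of the slice"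
-- (objective: idiomatic; equal return values on Pre_).


-- ===== PORT A =====
-- the while-loop of A: s1 accumulates characters walking i downwards until a
-- delimiter (or until i < last_idx); pyGet? none = Python IndexError (excluded by
-- Pre_, the loop then stops with the current s1 as a placeholder)
def pvLoopA (s lc : List Char) (last_idx : Int) (i : Int) (s1 : List Char) : List Char :=
  if _h : last_idx ≤ i then
    match PySem.List.pyGet? s i with
    | none => s1
    | some c => if c ∈ lc then s1 else pvLoopA s lc last_idx (i - 1) (s1 ++ [c])
  else s1
  termination_by (i - last_idx + 1).toNat
  decreasing_by omega

def move_back (s : String) (i : Int) (last_char : String) (last_idx : Int) : String :=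
  String.ofList ((pvLoopA s.toList last_char.toList last_idx (i - 1) []).reverse)  -- s1[::-1]

-- ===== PORT B =====
-- hand port of str.rfind for a single-character needle (exact: last_char is iterated
-- character by character in Source B): index of the last occurrence of c, -1 if absent
def pvRfind (seg : List Char) (c : Char) : Int :=
  match seg with
  | [] => -1
  | x :: xs => if 0 ≤ pvRfind xs c then pvRfind xs c + 1 else if x = c then 0 else -1

def move_back_alt (s : String) (i : Int) (last_char : String) (last_idx : Int) : String :=
  let seg := PySem.List.slice s.toList (some last_idx) (some i)
  let pos := last_char.toList.foldl (fun m c => max m (pvRfind seg c)) (-1)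
  String.ofList (PySem.List.slice seg (some (pos + 1)) none)

-- ===== PRECONDITION & SPEC =====
-- Pre_ restricts to the function's natural domain: either a real index window
-- 0 ≤ last_idx ≤ i ≤ len(s), or a window with i ≤ last_idx that Python slicing also
-- leaves empty (both programs return ""). It excludes inputs whose indices make A
-- raise IndexError or silently rely on Python's negative-index wraparound, which is
-- outside the function's natural domain (see cites).
def Pre_move_back (s : String) (i : Int) (last_char : String) (last_idx : Int) : Prop :=
  (0 ≤ last_idx ∧ last_idx ≤ i ∧ i ≤ (s.toList.length : Int)) ∨
  (i ≤ last_idx ∧ PySem.List.clampIdx s.toList.length i ≤ PySem.List.clampIdx s.toList.length last_idx)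
instance (s : String) (i : Int) (last_char : String) (last_idx : Int) : Decidable (Pre_move_back s i last_char last_idx) := by unfold Pre_move_back; infer_instance

def pvWitness_move_back : String × Int × String × Int := ("ab,cd", 5, ",", 0)

def Spec_move_back (s : String) (i : Int) (last_char : String) (last_idx : Int) (out : String) : Prop := out = move_back_alt s i last_char last_idx
instance (s : String) (i : Int) (last_char : String) (last_idx : Int) (out : String) : Decidable (Spec_move_back s i last_char last_idx out) := by unfold Spec_move_back; infer_instance

-- ===== CLAIM (what is proved, stated in full; the proofs are below) =====
def Claim_equal_move_back : Prop := ∀ (s : String) (i : Int) (last_char : String) (last_idx : Int), Dom_move_back s i last_char last_idx → Pre_move_back s i last_char last_idx → Spec_move_back s i last_char last_idx (move_back s i last_char last_idx)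

-- ===== LEMMAS AND PROOFS =====

-- B's folded maximum, as a named function for the lemmas
def pvG (f : Char → Int) (lc : List Char) : Int :=
  lc.foldl (fun m c => max m (f c)) (-1)

theorem pvRfind_bounds (seg : List Char) (c : Char) :
    -1 ≤ pvRfind seg c ∧ pvRfind seg c < (seg.length : Int) := by
  induction seg with
  | nil => simp [pvRfind]
  | cons x xs ih =>
    obtain ⟨h1, h2⟩ := ih
    rw [pvRfind]
    constructor <;> (split_ifs <;> push_cast [List.length_cons] <;> omega)

-- folding max commutes with a pre-applied max on the accumulator
theorem pv_foldl_max_max (f : Char → Int) (lc : List Char) (a b : Int) :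
    lc.foldl (fun m c => max m (f c)) (max a b)
      = max (lc.foldl (fun m c => max m (f c)) a) b := by
  induction lc generalizing a with
  | nil => simp
  | cons c lc ih =>
    simp only [List.foldl_cons]
    rw [max_right_comm, ih]

theorem pvG_cons (f : Char → Int) (c : Char) (lc : List Char) :
    pvG f (c :: lc) = max (pvG f lc) (f c) := by
  unfold pvG
  simp only [List.foldl_cons]
  exact pv_foldl_max_max f lc (-1) (f c)

theorem pvG_rfind_bounds (xs lc : List Char) :
    -1 ≤ pvG (pvRfind xs) lc ∧ pvG (pvRfind xs) lc < (xs.length : Int) := by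
  induction lc with
  | nil =>
    constructor
    · simp [pvG]
    · simp only [pvG, List.foldl_nil]
      omega
  | cons c lc ih =>
    rw [pvG_cons]
    have hc := pvRfind_bounds xs c
    exact ⟨le_trans ih.1 (le_max_left _ _), max_lt ih.2 hc.2⟩

theorem pvRfind_snoc (xs : List Char) (x c : Char) :
    pvRfind (xs ++ [x]) c = if x = c then (xs.length : Int) else pvRfind xs c := by
  induction xs with
  | nil => simp [pvRfind]
  | cons a xs ih =>
    have hb := pvRfind_bounds xs c
    rw [List.cons_append, pvRfind, pvRfind, ih]
    split_ifs <;> push_cast [List.length_cons] <;> omega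

-- the folded maximum over the delimiter set, on a snoc of the window
theorem pvG_snoc (xs : List Char) (x : Char) (lc : List Char) :
    pvG (pvRfind (xs ++ [x])) lc
      = if x ∈ lc then max (pvG (pvRfind xs) lc) (xs.length : Int)
        else pvG (pvRfind xs) lc := by
  induction lc with
  | nil => simp [pvG]
  | cons c lc ih =>
    rw [pvG_cons, pvG_cons, ih, pvRfind_snoc]
    have hG := pvG_rfind_bounds xs lc
    have hc := pvRfind_bounds xs c
    by_cases hxc : x = c
    · subst hxc
      have e1 : (if x = x then (xs.length : Int) else pvRfind xs x) = (xs.length : Int) :=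
        if_pos rfl
      have e2 : x ∈ x :: lc := List.mem_cons_self
      rw [e1, if_pos e2]
      by_cases hm : x ∈ lc
      · rw [if_pos hm]
        simp only [max_def]
        split_ifs <;> omega
      · rw [if_neg hm]
        simp only [max_def]
        split_ifs <;> omega
    · have hmem : (x ∈ c :: lc) ↔ (x ∈ lc) := by simp [hxc]
      rw [if_neg hxc]
      by_cases hm : x ∈ lc
      · rw [if_pos hm, if_pos (hmem.mpr hm), max_right_comm]
      · rw [if_neg hm, if_neg (fun h => hm (hmem.mp h))]

-- core: take-from-the-right-until-delimiter equals drop past the last delimiter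
theorem pv_core (lc : List Char) (xs : List Char) :
    (xs.reverse.takeWhile (fun c => decide (c ∉ lc))).reverse
      = xs.drop (pvG (pvRfind xs) lc + 1).toNat := by
  induction xs using List.reverseRecOn with
  | nil => simp
  | append_singleton xs x ih =>
    have hrev : (xs ++ [x]).reverse = x :: xs.reverse := by simp
    have hG := pvG_snoc xs x lc
    have hGb := pvG_rfind_bounds xs lc
    rw [hrev, List.takeWhile_cons, hG]
    by_cases hx : x ∈ lc
    · rw [if_pos hx, max_eq_right (le_of_lt hGb.2)]
      have hn : ((xs.length : Int) + 1).toNat = xs.length + 1 := by omega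
      rw [hn]
      simp [hx, List.drop_eq_nil_of_le]
    · rw [if_neg hx]
      simp only [hx, not_false_iff, decide_true, if_pos]
      have hle : (pvG (pvRfind xs) lc + 1).toNat ≤ xs.length := by omega
      rw [List.reverse_cons, ih, List.drop_append_of_le_length hle]

-- the loop of A computes takeWhile-not-delimiter over the reversed window
theorem pv_loopA_eq (s lc : List Char) (last_idx : Int) (hli : 0 ≤ last_idx) :
    ∀ (n : Nat) (i : Int) (acc : List Char), last_idx + n = i → i ≤ (s.length : Int) →
    pvLoopA s lc last_idx (i - 1) acc
      = acc ++ (((s.drop last_idx.toNat).take n).reverse.takeWhile (fun c => decide (c ∉ lc))) := by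
  intro n
  induction n with
  | zero =>
    intro i acc hi hlen
    rw [pvLoopA]
    have : ¬ last_idx ≤ i - 1 := by omega
    simp [this]
  | succ n ih =>
    intro i acc hi hlen
    rw [pvLoopA]
    have h1 : last_idx ≤ i - 1 := by omega
    have h2 : 0 ≤ i - 1 := by omega
    have h2' : (i - 1).toNat < s.length := by omega
    have hget : PySem.List.pyGet? s (i - 1) = some s[(i - 1).toNat] := by
      rw [PySem.List.pyGet?_of_nonneg s h2, List.getElem?_eq_getElem h2']
    have hn : n < (s.drop last_idx.toNat).length := by
      simp only [List.length_drop]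
      omega
    have htake : (s.drop last_idx.toNat).take (n + 1)
        = (s.drop last_idx.toNat).take n ++ [(s.drop last_idx.toNat)[n]] := by
      rw [List.take_succ, List.getElem?_eq_getElem hn]
      rfl
    have hidx : (s.drop last_idx.toNat)[n]'hn = s[(i - 1).toNat] := by
      rw [List.getElem_drop]
      congr 1
      omega
    rw [htake]
    simp only [h1, dite_true, hget, hidx, List.reverse_append, List.reverse_cons,
      List.reverse_nil, List.nil_append, List.singleton_append, List.takeWhile_cons]
    by_cases hc : s[(i - 1).toNat] ∈ lc
    · rw [if_pos hc, if_neg (by simpa using hc)]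
      simp
    · rw [if_neg hc, if_pos (by simpa using hc)]
      have hrec := ih (i - 1) (acc ++ [s[(i - 1).toNat]]) (by omega) (by omega)
      rw [show i - 1 - 1 = (i - 1) - 1 from rfl, hrec]
      simp [List.append_assoc]

-- ===== VERDICT (by name: the statement is the Claim_ definition above) =====
theorem move_back_spec : Claim_equal_move_back := by
  intro s i last_char last_idx _hdom hpre
  unfold Spec_move_back
  simp only [move_back, move_back_alt]
  rcases hpre with ⟨h0, h1, h2⟩ | ⟨h1, h2⟩
  · -- real window: the slice is the take/drop window of the loop
    have hseg : PySem.List.slice s.toList (some last_idx) (some i)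
        = List.take (i.toNat - last_idx.toNat) (List.drop last_idx.toNat s.toList) :=
      PySem.List.slice_toNat s.toList h0 (by omega)
    set n : Nat := i.toNat - last_idx.toNat with hn
    have hni : last_idx + (n : Int) = i := by omega
    have hloop := pv_loopA_eq s.toList last_char.toList last_idx h0 n i [] hni h2
    have hb := pvG_rfind_bounds (List.take n (List.drop last_idx.toNat s.toList)) last_char.toList
    have hb1 : (-1 : Int) ≤ (last_char.toList.foldl
        (fun m c => max m (pvRfind (List.take n (List.drop last_idx.toNat s.toList)) c)) (-1)) := hb.1
    rw [hloop, List.nil_append, hseg,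
      PySem.List.slice_from (List.take n (List.drop last_idx.toNat s.toList)) (by omega)]
    exact congrArg String.ofList (pv_core last_char.toList (List.take n (List.drop last_idx.toNat s.toList)))
  · -- empty window: both sides are ""
    have hlen : (PySem.List.slice s.toList (some last_idx) (some i)).length
        = PySem.List.clampIdx s.toList.length i - PySem.List.clampIdx s.toList.length last_idx :=
      PySem.List.length_slice s.toList last_idx i
    have hnil : PySem.List.slice s.toList (some last_idx) (some i) = [] := by
      apply List.eq_nil_of_length_eq_zero
      omega
    have hstop : ¬ last_idx ≤ i - 1 := by omega
    have hA : pvLoopA s.toList last_char.toList last_idx (i - 1) [] = [] := by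
      rw [pvLoopA]
      simp [hstop]
    simp only [hnil, hA, List.reverse_nil]
    rw [PySem.List.slice_some_none]
    simp
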